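-- pv_equiv track=rewrite | github.com/ryanckelly/Farmhand | mcp_servers/wiki_category_analyzer.py | categorize_by_type
-- ===== SOURCE A (Python) =====
-- def categorize_by_type(categories):
--     """Group categories by game content type."""
--     groups = {
--         'Items & Resources': [],
--         'NPCs & Characters': [],
--         'Locations & Buildings': [],
--         'Game Mechanics': [],
--         'Quests & Events': [],
--         'Other': []
--     }
--
--     for name, size in categories:
--         name_lower = name.lower()
--
--         # NPCs
--         if any(word in name_lower for word in ['villager', 'npc', 'character']):
--             groups['NPCs & Characters'].append((name, size))
--         # Locations
--         elif any(word in name_lower for word in ['location', 'place', 'building', 'room']):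
--             groups['Locations & Buildings'].append((name, size))
--         # Items
--         elif any(word in name_lower for word in [
--             'crop', 'fish', 'animal', 'item', 'food', 'product', 'goods',
--             'ore', 'gem', 'artifact', 'mineral', 'weapon', 'tool', 'equipment',
--             'seed', 'recipe', 'furniture', 'clothing'
--         ]):
--             groups['Items & Resources'].append((name, size))
--         # Mechanics
--         elif any(word in name_lower for word in [
--             'skill', 'profession', 'quest', 'bundle', 'achievement'
--         ]):
--             groups['Game Mechanics'].append((name, size))
--         # Events
--         elif any(word in name_lower for word in ['festival', 'event']):
--             groups['Quests & Events'].append((name, size))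
--         else:
--             groups['Other'].append((name, size))
--
--     # Sort each group by size
--     for group in groups:
--         groups[group].sort(key=lambda x: x[1], reverse=True)
--
--     return groups
-- ===== SOURCE B (Python) =====
-- _RULES = [
--     ('NPCs & Characters', ('villager', 'npc', 'character')),
--     ('Locations & Buildings', ('location', 'place', 'building', 'room')),
--     ('Items & Resources', ('crop', 'fish', 'animal', 'item', 'food', 'product', 'goods',
--                            'ore', 'gem', 'artifact', 'mineral', 'weapon', 'tool', 'equipment',
--                            'seed', 'recipe', 'furniture', 'clothing')),
--     ('Game Mechanics', ('skill', 'profession', 'quest', 'bundle', 'achievement')),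
--     ('Quests & Events', ('festival', 'event')),
-- ]
--
-- _ORDER = ['Items & Resources', 'NPCs & Characters', 'Locations & Buildings',
--           'Game Mechanics', 'Quests & Events', 'Other']
--
--
-- def _classify(name):
--     """First rule whose keyword occurs in the lowercased name, else 'Other'."""
--     nl = name.lower()
--     for group, words in _RULES:
--         if any(w in nl for w in words):
--             return group
--     return 'Other'
--
--
-- def categorize_by_type(categories):
--     """Group categories by game content type.
--
--     Data-driven: one stable sort of a copy of the input by size descending,
--     then one filter pass per group over the ranked list; sort stability makes
--     each group size-sorted with ties in input order, so no per-group sort."""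
--     ranked = sorted(categories, key=lambda x: x[1], reverse=True)
--     return {g: [(n, s) for n, s in ranked if _classify(n) == g] for g in _ORDER}
-- ===== Notes on version B (the rewrite author's own statement) =====
-- stated objective: alternative
-- what changed: B replaces the inline if/elif keyword chain plus per-group sorts by a data-driven rule table: it stably sorts a copy of the whole input once by size descending and then builds the result dict by one filter pass per group over the ranked list, relying on sort stability instead of six separate sorts.
import Mathlib
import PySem

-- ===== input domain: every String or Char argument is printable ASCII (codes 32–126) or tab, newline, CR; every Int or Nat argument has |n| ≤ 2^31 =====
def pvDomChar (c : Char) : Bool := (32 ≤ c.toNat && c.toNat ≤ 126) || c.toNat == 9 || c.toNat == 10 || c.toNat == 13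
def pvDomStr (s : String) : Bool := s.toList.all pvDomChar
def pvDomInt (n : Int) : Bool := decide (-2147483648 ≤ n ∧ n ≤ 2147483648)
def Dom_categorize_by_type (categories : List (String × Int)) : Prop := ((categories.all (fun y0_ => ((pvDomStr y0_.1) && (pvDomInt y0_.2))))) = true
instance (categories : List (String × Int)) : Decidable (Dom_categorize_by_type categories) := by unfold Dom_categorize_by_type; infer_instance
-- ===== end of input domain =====

-- B replaces the inline if/elif keyword chain plus six per-group sorts by a data-driven
-- rule table: one stable sort of a copy of the input by size descending, then one filter
-- pass per group over the ranked list (alternative decomposition, same cost).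

-- ===== PORT A =====
-- the dict literal A starts from
def pvGroupsInit : PySem.Dict String (List (String × Int)) :=
  PySem.Dict.ofList [("Items & Resources", []), ("NPCs & Characters", []),
    ("Locations & Buildings", []), ("Game Mechanics", []), ("Quests & Events", []), ("Other", [])]

def categorize_by_type (categories : List (String × Int)) : List (String × List (String × Int)) :=
  let groups := categories.foldl (fun d p =>
    let name_lower := PySem.Str.lower p.1
    if ["villager", "npc", "character"].any (fun w => PySem.Str.isIn w name_lower) then
      d.modify "NPCs & Characters" [] (· ++ [p])
    else if ["location", "place", "building", "room"].any (fun w => PySem.Str.isIn w name_lower) then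
      d.modify "Locations & Buildings" [] (· ++ [p])
    else if ["crop", "fish", "animal", "item", "food", "product", "goods",
             "ore", "gem", "artifact", "mineral", "weapon", "tool", "equipment",
             "seed", "recipe", "furniture", "clothing"].any (fun w => PySem.Str.isIn w name_lower) then
      d.modify "Items & Resources" [] (· ++ [p])
    else if ["skill", "profession", "quest", "bundle", "achievement"].any (fun w => PySem.Str.isIn w name_lower) then
      d.modify "Game Mechanics" [] (· ++ [p])
    else if ["festival", "event"].any (fun w => PySem.Str.isIn w name_lower) then
      d.modify "Quests & Events" [] (· ++ [p])
    else
      d.modify "Other" [] (· ++ [p])) pvGroupsInit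
  -- 'for group in groups: groups[group].sort(key=lambda x: x[1], reverse=True)' then return
  groups.items.map (fun kv => (kv.1, PySem.List.sorted kv.2 (fun x => x.2) true))

-- ===== PORT B =====
-- _RULES / _ORDER / _classify from Source B
def pvRules : List (String × List String) :=
  [("NPCs & Characters", ["villager", "npc", "character"]),
   ("Locations & Buildings", ["location", "place", "building", "room"]),
   ("Items & Resources", ["crop", "fish", "animal", "item", "food", "product", "goods",
                          "ore", "gem", "artifact", "mineral", "weapon", "tool", "equipment",
                          "seed", "recipe", "furniture", "clothing"]),
   ("Game Mechanics", ["skill", "profession", "quest", "bundle", "achievement"]),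
   ("Quests & Events", ["festival", "event"])]

def pvOrder : List String :=
  ["Items & Resources", "NPCs & Characters", "Locations & Buildings",
   "Game Mechanics", "Quests & Events", "Other"]

def pvClassify (name : String) : String :=
  let nl := PySem.Str.lower name
  match pvRules.find? (fun r => r.2.any (fun w => PySem.Str.isIn w nl)) with
  | some r => r.1
  | none => "Other"

def categorize_by_type_alt (categories : List (String × Int)) : List (String × List (String × Int)) :=
  let ranked := PySem.List.sorted categories (fun x => x.2) true
  pvOrder.map (fun g => (g, ranked.filter (fun p => pvClassify p.1 == g)))

-- ===== PRECONDITION & SPEC =====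
def Spec_categorize_by_type (categories : List (String × Int)) (out : List (String × List (String × Int))) : Prop := out = categorize_by_type_alt categories
instance (categories : List (String × Int)) (out : List (String × List (String × Int))) : Decidable (Spec_categorize_by_type categories out) := by unfold Spec_categorize_by_type; infer_instance

-- ===== CLAIM (what is proved, stated in full; the proofs are below) =====
def Claim_equal_categorize_by_type : Prop := ∀ (categories : List (String × Int)), Dom_categorize_by_type categories → Spec_categorize_by_type categories (categorize_by_type categories)

-- ===== LEMMAS AND PROOFS =====

-- proof-only name for A's if/elif classification
def pvGroupOf (name : String) : String :=
  let name_lower := PySem.Str.lower name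
  if ["villager", "npc", "character"].any (fun w => PySem.Str.isIn w name_lower) then
    "NPCs & Characters"
  else if ["location", "place", "building", "room"].any (fun w => PySem.Str.isIn w name_lower) then
    "Locations & Buildings"
  else if ["crop", "fish", "animal", "item", "food", "product", "goods",
           "ore", "gem", "artifact", "mineral", "weapon", "tool", "equipment",
           "seed", "recipe", "furniture", "clothing"].any (fun w => PySem.Str.isIn w name_lower) then
    "Items & Resources"
  else if ["skill", "profession", "quest", "bundle", "achievement"].any (fun w => PySem.Str.isIn w name_lower) then
    "Game Mechanics"
  else if ["festival", "event"].any (fun w => PySem.Str.isIn w name_lower) then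
    "Quests & Events"
  else "Other"

-- B's table-driven _classify computes A's chain
theorem classify_eq_groupOf (name : String) : pvClassify name = pvGroupOf name := by
  unfold pvClassify pvGroupOf pvRules
  dsimp only
  by_cases h1 : (["villager", "npc", "character"].any
      (fun w => PySem.Str.isIn w (PySem.Str.lower name)) = true) <;>
  by_cases h2 : (["location", "place", "building", "room"].any
      (fun w => PySem.Str.isIn w (PySem.Str.lower name)) = true) <;>
  by_cases h3 : (["crop", "fish", "animal", "item", "food", "product", "goods",
      "ore", "gem", "artifact", "mineral", "weapon", "tool", "equipment",
      "seed", "recipe", "furniture", "clothing"].any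
      (fun w => PySem.Str.isIn w (PySem.Str.lower name)) = true) <;>
  by_cases h4 : (["skill", "profession", "quest", "bundle", "achievement"].any
      (fun w => PySem.Str.isIn w (PySem.Str.lower name)) = true) <;>
  by_cases h5 : (["festival", "event"].any
      (fun w => PySem.Str.isIn w (PySem.Str.lower name)) = true) <;>
  simp only [Bool.not_eq_true] at h1 h2 h3 h4 h5 <;>
  simp only [List.find?, h1, h2, h3, h4, h5, if_true, if_false, Bool.false_eq_true]

-- A's inline if/elif branch chain is exactly 'modify at key (pvGroupOf name)'
theorem stepA_eq (d : PySem.Dict String (List (String × Int))) (p : String × Int) :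
    (let name_lower := PySem.Str.lower p.1
    if ["villager", "npc", "character"].any (fun w => PySem.Str.isIn w name_lower) then
      d.modify "NPCs & Characters" [] (· ++ [p])
    else if ["location", "place", "building", "room"].any (fun w => PySem.Str.isIn w name_lower) then
      d.modify "Locations & Buildings" [] (· ++ [p])
    else if ["crop", "fish", "animal", "item", "food", "product", "goods",
             "ore", "gem", "artifact", "mineral", "weapon", "tool", "equipment",
             "seed", "recipe", "furniture", "clothing"].any (fun w => PySem.Str.isIn w name_lower) then
      d.modify "Items & Resources" [] (· ++ [p])
    else if ["skill", "profession", "quest", "bundle", "achievement"].any (fun w => PySem.Str.isIn w name_lower) then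
      d.modify "Game Mechanics" [] (· ++ [p])
    else if ["festival", "event"].any (fun w => PySem.Str.isIn w name_lower) then
      d.modify "Quests & Events" [] (· ++ [p])
    else
      d.modify "Other" [] (· ++ [p])) = d.modify (pvGroupOf p.1) [] (· ++ [p]) := by
  unfold pvGroupOf
  dsimp only
  split_ifs <;> rfl

theorem groupOf_mem (name : String) :
    pvGroupOf name ∈ ["Items & Resources", "NPCs & Characters", "Locations & Buildings",
      "Game Mechanics", "Quests & Events", "Other"] := by
  unfold pvGroupOf
  dsimp only
  split_ifs <;> simp

theorem foldA_eq (l : List (String × Int)) (d0 : PySem.Dict String (List (String × Int))) :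
    l.foldl (fun d p =>
      let name_lower := PySem.Str.lower p.1
      if ["villager", "npc", "character"].any (fun w => PySem.Str.isIn w name_lower) then
        d.modify "NPCs & Characters" [] (· ++ [p])
      else if ["location", "place", "building", "room"].any (fun w => PySem.Str.isIn w name_lower) then
        d.modify "Locations & Buildings" [] (· ++ [p])
      else if ["crop", "fish", "animal", "item", "food", "product", "goods",
               "ore", "gem", "artifact", "mineral", "weapon", "tool", "equipment",
               "seed", "recipe", "furniture", "clothing"].any (fun w => PySem.Str.isIn w name_lower) then
        d.modify "Items & Resources" [] (· ++ [p])
      else if ["skill", "profession", "quest", "bundle", "achievement"].any (fun w => PySem.Str.isIn w name_lower) then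
        d.modify "Game Mechanics" [] (· ++ [p])
      else if ["festival", "event"].any (fun w => PySem.Str.isIn w name_lower) then
        d.modify "Quests & Events" [] (· ++ [p])
      else
        d.modify "Other" [] (· ++ [p])) d0
    = l.foldl (fun d p => d.modify (pvGroupOf p.1) [] (· ++ [p])) d0 := by
  apply PySem.List.foldl_congr_mem
  intro acc x _
  exact stepA_eq acc x

theorem initGetD (c : String) : pvGroupsInit.getD c [] = [] := by
  have h : pvGroupsInit = PySem.Dict.mk [("Items & Resources", []), ("NPCs & Characters", []),
    ("Locations & Buildings", []), ("Game Mechanics", []), ("Quests & Events", []), ("Other", [])] := by decide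
  rw [h, PySem.Dict.getD_eq_get?_getD]
  simp [PySem.Dict.get?_mk_cons]
  split_ifs <;> rfl
theorem getD_groupFold (l : List (String × Int)) (c : String) :
    (l.foldl (fun d p => d.modify (pvGroupOf p.1) [] (· ++ [p])) pvGroupsInit).getD c []
      = l.filter (fun p => pvGroupOf p.1 == c) := by
  have h := PySem.Dict.getD_foldl_modify_append
      (l.map (fun p => (pvGroupOf p.1, p))) pvGroupsInit c
  rw [List.foldl_map] at h
  rw [h, initGetD, List.filter_map, List.map_map]
  simp [Function.comp_def]
theorem keys_groupFold (l : List (String × Int)) :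
    (l.foldl (fun d p => d.modify (pvGroupOf p.1) [] (· ++ [p])) pvGroupsInit).keys
      = ["Items & Resources", "NPCs & Characters", "Locations & Buildings",
         "Game Mechanics", "Quests & Events", "Other"] := by
  rw [PySem.Dict.keys_foldl_modify_key l (fun p => pvGroupOf p.1) [] (fun _ p => (· ++ [p]))]
  have hk : pvGroupsInit.keys = ["Items & Resources", "NPCs & Characters", "Locations & Buildings",
      "Game Mechanics", "Quests & Events", "Other"] := by decide
  rw [hk, PySem.Set.update_eq_append_filter]
  rw [List.filter_eq_nil_iff.mpr ?_, List.append_nil]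
  intro y hy
  have : y ∈ l.map (fun p => pvGroupOf p.1) := (PySem.Set.mem_ofList _ _).mp hy
  obtain ⟨p, _, rfl⟩ := List.mem_map.mp this
  have := groupOf_mem p.1
  simp only [PySem.Set.contains_eq_listContains]
  simp_all
theorem items_groupFold (l : List (String × Int)) :
    (l.foldl (fun d p => d.modify (pvGroupOf p.1) [] (· ++ [p])) pvGroupsInit).items
      = ["Items & Resources", "NPCs & Characters", "Locations & Buildings",
         "Game Mechanics", "Quests & Events", "Other"].map
          (fun k => (k, l.filter (fun p => pvGroupOf p.1 == k))) := by
  have hnd : (l.foldl (fun d p => d.modify (pvGroupOf p.1) [] (· ++ [p])) pvGroupsInit).keys.Nodup := by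
    apply PySem.Dict.nodup_keys_foldl_modify_key l (fun p => pvGroupOf p.1) [] (fun _ p => (· ++ [p]))
    decide
  rw [PySem.Dict.items_eq_map_keys _ hnd [], keys_groupFold]
  exact List.map_congr_left (fun k _ => by rw [getD_groupFold])
theorem insertBy_cons_of_forall {α : Type} (before : α → α → Bool) (x : α) (zs : List α)
    (h : ∀ z ∈ zs, before x z = true) :
    PySem.List.insertBy before x zs = x :: zs := by
  cases zs with
  | nil => rfl
  | cons z zs => simp [PySem.List.insertBy, h z (by simp)]
theorem filter_insertBy_rev {α : Type} (key : α → Int) (p : α → Bool) (x : α) (ys : List α)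
    (h : ys.Pairwise (fun a b => key b ≤ key a)) :
    (PySem.List.insertBy (fun a b => decide (key b < key a)) x ys).filter p
      = if p x then PySem.List.insertBy (fun a b => decide (key b < key a)) x (ys.filter p)
        else ys.filter p := by
  induction ys with
  | nil => by_cases hpx : p x <;> simp [PySem.List.insertBy, List.filter, hpx]
  | cons y ys ih =>
    have hpw := (List.pairwise_cons.mp h).1
    have htl := (List.pairwise_cons.mp h).2
    by_cases hb : key y < key x
    · rw [show PySem.List.insertBy (fun a b => decide (key b < key a)) x (y :: ys)
            = x :: y :: ys by simp [PySem.List.insertBy, hb]]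
      by_cases hpx : p x
      · by_cases hpy : p y
        · simp only [List.filter_cons, hpx, hpy, if_pos]
          rw [show PySem.List.insertBy (fun a b => decide (key b < key a)) x (y :: List.filter p ys)
                = x :: y :: List.filter p ys by simp [PySem.List.insertBy, hb]]
        · simp only [List.filter_cons, hpx, hpy, if_pos, if_neg, Bool.false_eq_true,
            not_false_iff]
          rw [insertBy_cons_of_forall]
          intro z hz
          have hzy : key z ≤ key y := hpw z (List.mem_of_mem_filter hz)
          simp [lt_of_le_of_lt hzy hb]
      · simp [List.filter_cons, hpx]
    · rw [show PySem.List.insertBy (fun a b => decide (key b < key a)) x (y :: ys)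
            = y :: PySem.List.insertBy (fun a b => decide (key b < key a)) x ys by
          simp [PySem.List.insertBy, hb]]
      by_cases hpx : p x
      · by_cases hpy : p y
        · simp only [List.filter_cons, hpx, hpy, if_pos, ih htl]
          rw [show PySem.List.insertBy (fun a b => decide (key b < key a)) x (y :: List.filter p ys)
                = y :: PySem.List.insertBy (fun a b => decide (key b < key a)) x (List.filter p ys) by
              simp [PySem.List.insertBy, hb]]
        · simp only [List.filter_cons, hpx, hpy, Bool.false_eq_true, if_false, if_pos, ih htl]
      · simp only [List.filter_cons, hpx, Bool.false_eq_true, if_false, ih htl]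
theorem filter_sorted_rev {α : Type} (key : α → Int) (p : α → Bool) (l : List α) :
    (PySem.List.sorted l key true).filter p = PySem.List.sorted (l.filter p) key true := by
  induction l using List.reverseRecOn with
  | nil => rfl
  | append_singleton l x ih =>
    rw [PySem.List.sorted_rev_eq_foldl_insertBy (l ++ [x]) key, List.foldl_append,
        ← PySem.List.sorted_rev_eq_foldl_insertBy l key]
    simp only [List.foldl_cons, List.foldl_nil]
    rw [filter_insertBy_rev key p x _ (PySem.List.sorted_pairwise_rev l key), ih,
        List.filter_append]
    by_cases hpx : p x <;> simp only [hpx, List.filter_cons, List.filter_nil, if_true]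
    · rw [PySem.List.sorted_rev_eq_foldl_insertBy (l.filter p ++ [x]) key, List.foldl_append,
          ← PySem.List.sorted_rev_eq_foldl_insertBy (l.filter p) key]
      simp
    · simp

-- ===== VERDICT (by name: the statement is the Claim_ definition above) =====
theorem categorize_by_type_spec : Claim_equal_categorize_by_type := by
  intro categories _
  unfold Spec_categorize_by_type categorize_by_type categorize_by_type_alt
  dsimp only
  rw [foldA_eq, items_groupFold, List.map_map]
  show _ = pvOrder.map _
  unfold pvOrder
  refine List.map_congr_left ?_
  intro k _
  simp only [Function.comp]
  rw [funext (fun p => congrArg (· == k) (classify_eq_groupOf (Prod.fst p))), filter_sorted_rev]
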